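-- pv_equiv track=rewrite | github.com/OPU-Surveillance-System/monitoring | master/scripts/planner/solvers/AlgoPlusCourtsCheminsPourDronesAlphav1.py | distribution1
-- ===== SOURCE A (Python) =====
-- import copy
--
-- def longueur(ListeDeListe):
--     l = 0
--     for Liste in ListeDeListe:
--         l = l + len(Liste)
--     return l
--
-- def distribution1(Routes):
--     R = copy.deepcopy(Routes)
--     d1 = []
--     d2 = []
--     while len(R) > 0:
--         L = list(map(len, R))
--         i = L.index(max(L))
--         if longueur(d1) <= longueur(d2):
--             d1.append(R[i])
--         else:
--             d2.append(R[i])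
--         del R[i]
--     return d1,d2
-- ===== SOURCE B (Python) =====
-- def distribution1(Routes):
--     d1, d2 = [], []
--     s1 = s2 = 0
--     for r in sorted(Routes, key=len, reverse=True):
--         if s1 <= s2:
--             d1.append(r)
--             s1 += len(r)
--         else:
--             d2.append(r)
--             s2 += len(r)
--     return d1, d2
-- ===== Notes on version B (the rewrite author's own statement) =====
-- stated objective: faster
-- what changed: Replaces the quadratic loop (repeated max+index scan over the remaining routes and full recomputation of both group lengths at every step) by one stable descending sort by length followed by a single pass that keeps incremental running totals of the two group lengths.
import Mathlib
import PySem

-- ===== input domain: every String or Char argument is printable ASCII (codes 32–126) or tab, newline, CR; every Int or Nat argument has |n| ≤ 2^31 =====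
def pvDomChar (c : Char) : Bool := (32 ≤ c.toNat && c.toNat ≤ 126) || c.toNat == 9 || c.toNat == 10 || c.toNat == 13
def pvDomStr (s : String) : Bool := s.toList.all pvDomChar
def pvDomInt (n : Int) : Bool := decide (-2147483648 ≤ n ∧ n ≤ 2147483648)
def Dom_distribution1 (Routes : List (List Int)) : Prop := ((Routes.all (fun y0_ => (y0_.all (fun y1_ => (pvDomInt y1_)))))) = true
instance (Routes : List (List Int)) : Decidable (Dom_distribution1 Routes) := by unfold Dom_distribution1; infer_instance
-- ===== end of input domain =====

-- B replaces A's quadratic repeated-max selection with one stable descending sort by length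
-- plus a single pass keeping incremental running totals (faster; return values identical —
-- A deepcopies its input while B returns the original route lists, same values either way).


-- ===== PORT A =====
-- helper 'longueur' of the module
def pvLongueur (ListeDeListe : List (List Int)) : Int :=
  ListeDeListe.foldl (fun l Liste => l + (Liste.length : Int)) 0

-- the first index of the maximal length, i = L.index(max(L)); needed by the port's termination proof
def pvArgmax (R : List (List Int)) : Nat :=
  (PySem.List.index? (R.map (fun x => (x.length : Int)))
    ((PySem.List.max? (R.map (fun x => (x.length : Int))) (fun v => v)).getD 0)).getD 0

lemma pvArgmax_lt (R : List (List Int)) (h : R ≠ []) : pvArgmax R < R.length := by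
  obtain ⟨r, rs, rfl⟩ := List.exists_cons_of_ne_nil h
  have hmax : ∃ m, PySem.List.max? ((r :: rs).map (fun x => (x.length : Int))) (fun v => v) = some m := by
    rcases hm : PySem.List.max? ((r :: rs).map (fun x => (x.length : Int))) (fun v => v) with _ | m
    · rw [PySem.List.max?_eq_none_iff] at hm; simp at hm
    · exact ⟨m, hm⟩
  obtain ⟨m, hm⟩ := hmax
  have hmem : m ∈ (r :: rs).map (fun x => (x.length : Int)) := PySem.List.max?_mem hm
  have hidx : ∃ k, PySem.List.index? ((r :: rs).map (fun x => (x.length : Int))) m = some k := by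
    rcases hk : PySem.List.index? ((r :: rs).map (fun x => (x.length : Int))) m with _ | k
    · rw [PySem.List.index?_eq_none_iff] at hk; exact absurd hmem hk
    · exact ⟨k, hk⟩
  obtain ⟨k, hk⟩ := hidx
  obtain ⟨hlt, -, -⟩ := PySem.List.getElem_of_index?_eq_some hk
  simp only [pvArgmax, hm, Option.getD_some, hk]
  simpa using hlt

-- while len(R) > 0: i = (map len R).index(max(map len R)); append R[i] to the lighter side; del R[i]
def pvLoopA (R d1 d2 : List (List Int)) : List (List Int) × List (List Int) :=
  if h : R ≠ [] then
    let i := pvArgmax R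
    if pvLongueur d1 ≤ pvLongueur d2 then
      pvLoopA (R.eraseIdx i) (d1 ++ [R.getD i []]) d2
    else
      pvLoopA (R.eraseIdx i) d1 (d2 ++ [R.getD i []])
  else (d1, d2)
termination_by R.length
decreasing_by
  all_goals
    have hlt := pvArgmax_lt R h
    rw [List.length_eraseIdx]
    split
    · omega
    · omega

def distribution1 (Routes : List (List Int)) : List (List Int) × List (List Int) :=
  pvLoopA Routes [] []

-- ===== PORT B =====
-- one pass over sorted(Routes, key=len, reverse=True), with running totals s1, s2
def pvStepB (st : (List (List Int) × Int) × (List (List Int) × Int)) (r : List Int) :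
    (List (List Int) × Int) × (List (List Int) × Int) :=
  if st.1.2 ≤ st.2.2 then ((st.1.1 ++ [r], st.1.2 + (r.length : Int)), st.2)
  else (st.1, (st.2.1 ++ [r], st.2.2 + (r.length : Int)))

def distribution1_alt (Routes : List (List Int)) : List (List Int) × List (List Int) :=
  let t := (PySem.List.sorted Routes (fun r => (r.length : Int)) true).foldl pvStepB (([], 0), ([], 0))
  (t.1.1, t.2.1)

-- ===== PRECONDITION & SPEC =====
def Spec_distribution1 (Routes : List (List Int)) (out : List (List Int) × List (List Int)) : Prop := out = distribution1_alt Routes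
instance (Routes : List (List Int)) (out : List (List Int) × List (List Int)) : Decidable (Spec_distribution1 Routes out) := by unfold Spec_distribution1; infer_instance

-- ===== CLAIM (what is proved, stated in full; the proofs are below) =====
def Claim_equal_distribution1 : Prop := ∀ (Routes : List (List Int)), Dom_distribution1 Routes → Spec_distribution1 Routes (distribution1 Routes)

-- ===== LEMMAS AND PROOFS =====

lemma pvLongueur_snoc (d : List (List Int)) (x : List Int) :
    pvLongueur (d ++ [x]) = pvLongueur d + (x.length : Int) := by
  simp [pvLongueur, List.foldl_append]

lemma pvSorted_snoc (ys : List (List Int)) (y : List Int) :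
    PySem.List.sorted (ys ++ [y]) (fun r => (r.length : Int)) true =
      PySem.List.insertBy (fun a b => decide ((b.length : Int) < (a.length : Int))) y
        (PySem.List.sorted ys (fun r => (r.length : Int)) true) := by
  rw [PySem.List.sorted_rev_eq_foldl_insertBy, PySem.List.sorted_rev_eq_foldl_insertBy,
    List.foldl_append]
  rfl

-- the stable descending sort starts with the first route of maximal length,
-- and its tail is the sort of the remaining routes
lemma pvArgmax_spec (R : List (List Int)) (h : R ≠ []) :
    ∃ m, PySem.List.max? (R.map (fun x => (x.length : Int))) (fun v => v) = some m ∧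
      PySem.List.index? (R.map (fun x => (x.length : Int))) m = some (pvArgmax R) := by
  obtain ⟨r, rs, rfl⟩ := List.exists_cons_of_ne_nil h
  rcases hm : PySem.List.max? ((r :: rs).map (fun x => (x.length : Int))) (fun v => v) with _ | m
  · rw [PySem.List.max?_eq_none_iff] at hm; simp at hm
  · have hmem : m ∈ (r :: rs).map (fun x => (x.length : Int)) := PySem.List.max?_mem hm
    rcases hk : PySem.List.index? ((r :: rs).map (fun x => (x.length : Int))) m with _ | k
    · rw [PySem.List.index?_eq_none_iff] at hk; exact absurd hmem hk
    · exact ⟨m, hm, by simp only [pvArgmax, hm, Option.getD_some, hk]⟩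

lemma pvExtract (R : List (List Int)) (h : R ≠ []) :
    PySem.List.sorted R (fun r => (r.length : Int)) true =
      R.getD (pvArgmax R) [] ::
        PySem.List.sorted (R.eraseIdx (pvArgmax R)) (fun r => (r.length : Int)) true := by
  induction R using List.reverseRecOn with
  | nil => exact absurd rfl h
  | append_singleton ys y ih =>
    by_cases hys : ys = []
    · subst hys
      simp only [List.nil_append]
      have h0 : pvArgmax [y] = 0 := by
        simp [pvArgmax, PySem.List.max?]
      rw [h0]
      simp [PySem.List.sorted, PySem.List.insertBy]
    · obtain ⟨m, hm, hk⟩ := pvArgmax_spec ys hys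
      have hforall : ∀ v ∈ ys.map (fun x => (x.length : Int)), v ≤ m :=
        PySem.List.max?_isMax hm
      have hjlt : pvArgmax ys < ys.length := pvArgmax_lt ys hys
      obtain ⟨hk', hkey, -⟩ := PySem.List.getElem_of_index?_eq_some hk
      -- max over the snoc list
      have hmax2 : PySem.List.max? ((ys ++ [y]).map (fun x => (x.length : Int))) (fun v => v) =
          if m < (y.length : Int) then some ((y.length : Int)) else some m := by
        simp only [PySem.List.max?, List.map_append] at hm ⊢
        rw [List.foldl_append, hm]
        simp
      by_cases hy : m < (y.length : Int)
      · -- the new route is strictly longest: it goes first, the rest is ys again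
        have hnotmem : (y.length : Int) ∉ ys.map (fun x => (x.length : Int)) := by
          intro hmem
          exact absurd (hforall _ hmem) (by omega)
        have hidx2 : pvArgmax (ys ++ [y]) = ys.length := by
          simp only [List.map_append, List.map_cons, List.map_nil] at hmax2
          simp only [pvArgmax, List.map_append, List.map_cons, List.map_nil, hmax2,
            if_pos hy, Option.getD_some]
          rw [PySem.List.index?_append_singleton_self _ _ hnotmem]
          simp
        rw [hidx2]
        have hgetD : (ys ++ [y]).getD ys.length [] = y := by
          rw [List.getD_append_right ys [y] [] ys.length le_rfl]
          simp
        have herase : (ys ++ [y]).eraseIdx ys.length = ys := by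
          rw [List.eraseIdx_append]
          simp
        rw [hgetD, herase, pvSorted_snoc]
        -- sorted ys is nonempty with a head of maximal (hence < len y) key
        rw [ih hys]
        have hhd : ((ys.getD (pvArgmax ys) []).length : Int) < (y.length : Int) := by
          rw [List.getD_eq_getElem ys [] hjlt]
          have : ((ys[pvArgmax ys]).length : Int) ∈ ys.map (fun x => (x.length : Int)) :=
            List.mem_map_of_mem (List.getElem_mem hjlt)
          have := hforall _ this
          omega
        simp only [List.getD_eq_getElem?_getD] at hhd
        simp [PySem.List.insertBy, hhd]
      · -- the first maximum stays inside ys at the same index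
        have hmem : m ∈ ys.map (fun x => (x.length : Int)) := PySem.List.max?_mem hm
        have hidx2 : pvArgmax (ys ++ [y]) = pvArgmax ys := by
          simp only [List.map_append, List.map_cons, List.map_nil] at hmax2
          simp only [pvArgmax, List.map_append, List.map_cons, List.map_nil, hmax2,
            if_neg hy, Option.getD_some]
          rw [PySem.List.index?_append_of_mem _ hmem, hk, hm]
          rw [PySem.List.index?_eq_idxOf?] at hk
          simp [hk]
        rw [hidx2]
        have hgetD : (ys ++ [y]).getD (pvArgmax ys) [] = ys.getD (pvArgmax ys) [] := by
          rw [List.getD_append ys [y] [] (pvArgmax ys) hjlt]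
        have herase : (ys ++ [y]).eraseIdx (pvArgmax ys) = ys.eraseIdx (pvArgmax ys) ++ [y] := by
          rw [List.eraseIdx_append, if_pos hjlt]
        rw [hgetD, herase, pvSorted_snoc, ih hys]
        have hhd : ¬ (((ys.getD (pvArgmax ys) []).length : Int) < (y.length : Int)) := by
          rw [List.getD_eq_getElem ys [] hjlt]
          have : ((ys[pvArgmax ys]).length : Int) = m := by
            simpa using hkey
          omega
        simp only [List.getD_eq_getElem?_getD] at hhd
        rw [pvSorted_snoc]
        simp [PySem.List.insertBy, hhd]

lemma pvLoopA_eq (n : Nat) : ∀ (R : List (List Int)), R.length ≤ n → ∀ (d1 d2 : List (List Int)),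
    pvLoopA R d1 d2 =
      (let t := (PySem.List.sorted R (fun r => (r.length : Int)) true).foldl pvStepB
        ((d1, pvLongueur d1), (d2, pvLongueur d2));
       (t.1.1, t.2.1)) := by
  induction n with
  | zero =>
    intro R hR d1 d2
    have : R = [] := List.eq_nil_of_length_eq_zero (by omega)
    subst this
    rw [pvLoopA]
    simp [PySem.List.sorted]
  | succ n ih =>
    intro R hR d1 d2
    by_cases h : R = []
    · subst h
      rw [pvLoopA]
      simp [PySem.List.sorted]
    · have hlen : (R.eraseIdx (pvArgmax R)).length ≤ n := by
        have := pvArgmax_lt R h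
        rw [List.length_eraseIdx]
        split <;> omega
      rw [pvLoopA, dif_pos h, pvExtract R h, List.foldl_cons]
      by_cases hc : pvLongueur d1 ≤ pvLongueur d2
      · simp only [hc, if_pos]
        rw [ih _ hlen]
        simp [pvStepB, hc, pvLongueur_snoc]
      · simp only [hc, if_neg, not_false_iff]
        rw [ih _ hlen]
        simp [pvStepB, hc, pvLongueur_snoc]

-- ===== VERDICT (by name: the statement is the Claim_ definition above) =====
theorem distribution1_spec : Claim_equal_distribution1 := by
  intro Routes _
  unfold Spec_distribution1 distribution1 distribution1_alt
  have := pvLoopA_eq Routes.length Routes le_rfl [] []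
  simpa [pvLongueur] using this
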